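-- pv_equiv track=rewrite | github.com/ayatallan/Access-Control-Demo | access_control.py | abac_has_access
-- ===== SOURCE A (Python) =====
-- def abac_has_access(user_name, resource):
--     jobs = {
--         "managers": {"files": "read_write", "videos": "read_write"},
--         "staff": {"files": "read_only", "videos": "read_only"}
--     }
--
--     def get_users(job):
--         if job == "managers":
--             return ["Baraa", "Ayat"]
--         elif job == "staff":
--             return ["Alice", "Bob"]
--         else:
--             return []
--
--     for job, permissions in jobs.items():
--         if user_name in get_users(job) and resource in permissions:
--             access_type = jobs[job][resource]
--             return f"{user_name} in {job} has {access_type} access to {resource}."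
--     return f"{user_name} does not have access to {resource}."
-- ===== SOURCE B (Python) =====
-- USER_JOB = {"Baraa": "managers", "Ayat": "managers", "Alice": "staff", "Bob": "staff"}
-- PERMS = {
--     "managers": {"files": "read_write", "videos": "read_write"},
--     "staff": {"files": "read_only", "videos": "read_only"},
-- }
--
-- def abac_has_access(user_name, resource):
--     job = USER_JOB.get(user_name)
--     if job is not None:
--         access_type = PERMS[job].get(resource)
--         if access_type is not None:
--             return f"{user_name} in {job} has {access_type} access to {resource}."
--     return f"{user_name} does not have access to {resource}."
-- ===== Notes on version B (the rewrite author's own statement) =====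
-- stated objective: idiomatic
-- what changed: Replaced A's scan over every job with per-job membership tests by a precomputed user->job index looked up once, followed by a single keyed permission lookup.
import Mathlib
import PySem

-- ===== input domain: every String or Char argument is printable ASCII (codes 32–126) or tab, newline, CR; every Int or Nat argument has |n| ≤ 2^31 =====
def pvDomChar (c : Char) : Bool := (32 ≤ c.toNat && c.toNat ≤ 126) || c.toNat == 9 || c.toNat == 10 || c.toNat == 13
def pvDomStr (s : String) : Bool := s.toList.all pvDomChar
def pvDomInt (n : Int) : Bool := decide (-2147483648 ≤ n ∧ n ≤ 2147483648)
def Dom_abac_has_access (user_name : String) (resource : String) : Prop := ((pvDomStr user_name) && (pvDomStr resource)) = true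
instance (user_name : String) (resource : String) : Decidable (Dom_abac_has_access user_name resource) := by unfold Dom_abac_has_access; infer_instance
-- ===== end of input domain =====

-- ===== PORT A =====
-- B replaces A's scan over all jobs (membership test per job) by a direct user->job lookup; idiomatic, same results.
def pvGetUsers (job : String) : List String :=
  if job = "managers" then ["Baraa", "Ayat"]
  else if job = "staff" then ["Alice", "Bob"]
  else []

def pvJobs : PySem.Dict String (PySem.Dict String String) :=
  PySem.Dict.mk
    [("managers", PySem.Dict.mk [("files", "read_write"), ("videos", "read_write")]),
     ("staff", PySem.Dict.mk [("files", "read_only"), ("videos", "read_only")])]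

-- the for-loop over jobs.items(): first matching (job, permissions) wins
def pvAbacLoop (user_name : String) (resource : String) :
    List (String × PySem.Dict String String) → String
  | [] => user_name ++ " does not have access to " ++ resource ++ "."
  | (job, permissions) :: rest =>
    if user_name ∈ pvGetUsers job ∧ (PySem.Dict.get? permissions resource).isSome then
      -- access_type = jobs[job][resource]; both lookups succeed in this branch
      let access_type := PySem.Dict.getD (PySem.Dict.getD pvJobs job PySem.Dict.empty) resource ""
      user_name ++ " in " ++ job ++ " has " ++ access_type ++ " access to " ++ resource ++ "."
    else pvAbacLoop user_name resource rest

def abac_has_access (user_name : String) (resource : String) : String :=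
  pvAbacLoop user_name resource pvJobs.items

-- ===== PORT B =====
def pvUserJob : PySem.Dict String String :=
  PySem.Dict.mk [("Baraa", "managers"), ("Ayat", "managers"), ("Alice", "staff"), ("Bob", "staff")]

def pvPerms : PySem.Dict String (PySem.Dict String String) :=
  PySem.Dict.mk
    [("managers", PySem.Dict.mk [("files", "read_write"), ("videos", "read_write")]),
     ("staff", PySem.Dict.mk [("files", "read_only"), ("videos", "read_only")])]

def abac_has_access_alt (user_name : String) (resource : String) : String :=
  match PySem.Dict.get? pvUserJob user_name with
  | some job =>
    match PySem.Dict.get? (PySem.Dict.getD pvPerms job PySem.Dict.empty) resource with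
    | some access_type =>
        user_name ++ " in " ++ job ++ " has " ++ access_type ++ " access to " ++ resource ++ "."
    | none => user_name ++ " does not have access to " ++ resource ++ "."
  | none => user_name ++ " does not have access to " ++ resource ++ "."

-- ===== PRECONDITION & SPEC =====
def Spec_abac_has_access (user_name : String) (resource : String) (out : String) : Prop := out = abac_has_access_alt user_name resource
instance (user_name : String) (resource : String) (out : String) : Decidable (Spec_abac_has_access user_name resource out) := by unfold Spec_abac_has_access; infer_instance

-- ===== CLAIM (what is proved, stated in full; the proofs are below) =====
def Claim_equal_abac_has_access : Prop := ∀ (user_name : String) (resource : String), Dom_abac_has_access user_name resource → Spec_abac_has_access user_name resource (abac_has_access user_name resource)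

-- ===== LEMMAS AND PROOFS =====
theorem pvAbac_eq (user_name resource : String) :
    abac_has_access user_name resource = abac_has_access_alt user_name resource := by
  by_cases h1 : user_name = "Baraa" <;>
  by_cases h2 : user_name = "Ayat" <;>
  by_cases h3 : user_name = "Alice" <;>
  by_cases h4 : user_name = "Bob" <;>
  by_cases h5 : resource = "files" <;>
  by_cases h6 : resource = "videos" <;>
  · subst_vars
    simp only [abac_has_access, abac_has_access_alt, pvAbacLoop, pvGetUsers, pvJobs,
      pvUserJob, pvPerms, PySem.Dict.get?, PySem.Dict.getD, PySem.Dict.empty,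
      List.find?, beq_eq_decide]
    simp_all [eq_comm]

-- ===== VERDICT (by name: the statement is the Claim_ definition above) =====
theorem abac_has_access_spec : Claim_equal_abac_has_access := by
  intro u r _
  unfold Spec_abac_has_access
  exact pvAbac_eq u r
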